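-- pv_equiv track=rewrite | github.com/francosalvucci14/Esercizi_ASD | Esami/Esame 25-07-23/Esame_25-07-23.py | kpicco
-- ===== SOURCE A (Python) =====
-- def kpicco(a):
--     n=len(a)
--     if n == 1 or n == 2:
--         return 0
--     k=0
--     max_k=0
--
--     for i in range(1,n-1):
--         if a[i]>a[i+1] and a[i]>a[i-1]:
--             k+=1
--             max_k+=k
--
--         else:
--             k=0
--     return max_k
-- ===== SOURCE B (Python) =====
-- def kpicco(a):
--     d = [y - x for x, y in zip(a, a[1:])]
--     return sum(1 for u, v in zip(d, d[1:]) if u > 0 > v)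
-- ===== Notes on version B (the rewrite author's own statement) =====
-- stated objective: alternative
-- what changed: A's single index loop with a run counter k and weighted accumulator max_k (k is provably always 0 or 1, since adjacent strict peaks are impossible) is replaced by a staged-pass pipeline: first build the list of adjacent differences with zip, then count sign changes from positive to negative in that difference list.
import Mathlib
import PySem

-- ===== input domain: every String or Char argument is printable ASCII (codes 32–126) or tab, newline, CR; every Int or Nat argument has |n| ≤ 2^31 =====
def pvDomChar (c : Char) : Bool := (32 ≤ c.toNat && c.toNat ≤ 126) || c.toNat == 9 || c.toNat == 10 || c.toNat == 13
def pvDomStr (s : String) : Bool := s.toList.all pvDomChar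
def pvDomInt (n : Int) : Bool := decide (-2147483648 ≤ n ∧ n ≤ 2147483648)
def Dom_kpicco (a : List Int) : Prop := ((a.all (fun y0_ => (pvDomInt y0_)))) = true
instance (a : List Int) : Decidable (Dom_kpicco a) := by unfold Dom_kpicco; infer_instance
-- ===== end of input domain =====

-- B replaces A's index loop with its run counter k and weighted accumulator max_k (k can
-- only ever be 0 or 1, since adjacent strict peaks are impossible) by a staged pipeline:
-- build the adjacent-difference list with zip, then count '+ to -' sign changes in it.

-- ===== PORT A =====
-- Indexing ported with pyGetD (default 0): exact here, since every index touched
-- (i-1, i, i+1 for i in range(1, n-1)) lies in 0..n-1, where a[j] never raises.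
def kpicco (a : List Int) : Int :=
  let n : Int := a.length
  if n = 1 ∨ n = 2 then 0
  else
    ((PySem.List.pyRange 1 (n - 1) 1).foldl
      (fun (s : Int × Int) i =>
        if PySem.List.pyGetD a i 0 > PySem.List.pyGetD a (i + 1) 0 ∧
           PySem.List.pyGetD a i 0 > PySem.List.pyGetD a (i - 1) 0 then
          (s.1 + 1, s.2 + (s.1 + 1))
        else
          (0, s.2))
      (0, 0)).2

-- ===== PORT B =====
def kpicco_alt (a : List Int) : Int :=
  let d := (List.zip a (PySem.List.slice a (some 1) none)).map (fun p => p.2 - p.1)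
  (List.zip d (PySem.List.slice d (some 1) none)).foldl
    (fun (acc : Int) p => if p.1 > 0 ∧ 0 > p.2 then acc + 1 else acc) 0

-- ===== PRECONDITION & SPEC =====
def Spec_kpicco (a : List Int) (out : Int) : Prop := out = kpicco_alt a
instance (a : List Int) (out : Int) : Decidable (Spec_kpicco a out) := by unfold Spec_kpicco; infer_instance

-- ===== CLAIM (what is proved, stated in full; the proofs are below) =====
def Claim_equal_kpicco : Prop := ∀ (a : List Int), Dom_kpicco a → Spec_kpicco a (kpicco a)

-- ===== LEMMAS AND PROOFS =====

-- The common reference value: the number of strict interior peaks, by structural recursion.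
def pvPeaks : List Int → Int
  | x :: y :: z :: t => (if y > x ∧ y > z then 1 else 0) + pvPeaks (y :: z :: t)
  | _ => 0

-- The adjacent-difference list B builds (slice a 1 none already rewritten to a.tail).
def pvDiffs (a : List Int) : List Int := (List.zip a a.tail).map (fun p => p.2 - p.1)

-- B's side: the zip/difference pipeline counts exactly the strict interior peaks.
lemma alt_fold_eq_peaks : ∀ (a : List Int) (acc : Int),
    (List.zip (pvDiffs a) (pvDiffs a).tail).foldl
      (fun (acc : Int) p => if p.1 > 0 ∧ 0 > p.2 then acc + 1 else acc) acc
    = acc + pvPeaks a := by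
  intro a
  induction a with
  | nil => intro acc; simp [pvDiffs, pvPeaks]
  | cons x rest ih =>
    intro acc
    match rest with
    | [] => simp [pvDiffs, pvPeaks]
    | [y] => simp [pvDiffs, pvPeaks]
    | y :: z :: t =>
      have hd : pvDiffs (x :: y :: z :: t) = (y - x) :: pvDiffs (y :: z :: t) := by
        simp [pvDiffs]
      have hd2 : pvDiffs (y :: z :: t) = (z - y) :: pvDiffs (z :: t) := by
        simp [pvDiffs]
      rw [hd, hd2]
      rw [show List.zip ((y-x) :: (z-y) :: pvDiffs (z :: t)) (((y-x) :: (z-y) :: pvDiffs (z :: t)).tail)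
            = ((y-x), (z-y)) :: List.zip ((z-y) :: pvDiffs (z :: t)) (pvDiffs (z :: t)) from by simp]
      rw [List.foldl_cons]
      rw [← hd2, show pvDiffs (z :: t) = (pvDiffs (y :: z :: t)).tail from by rw [hd2, List.tail_cons]]
      rw [ih]
      have hcond : (y - x > 0 ∧ 0 > z - y) ↔ (y > x ∧ y > z) := by omega
      show _ = acc + pvPeaks (x :: y :: z :: t)
      rw [show pvPeaks (x :: y :: z :: t) = (if y > x ∧ y > z then (1:Int) else 0) + pvPeaks (y :: z :: t) from rfl]
      by_cases hc : y > x ∧ y > z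
      · rw [if_pos (hcond.mpr hc), if_pos hc]; ring
      · rw [if_neg (fun h => hc (hcond.mp h)), if_neg hc]; ring

lemma alt_eq_peaks (a : List Int) : kpicco_alt a = pvPeaks a := by
  unfold kpicco_alt
  simp only [PySem.List.slice_from_one]
  change (List.zip (pvDiffs a) (pvDiffs a).tail).foldl
    (fun (acc : Int) p => if p.1 > 0 ∧ 0 > p.2 then acc + 1 else acc) 0 = pvPeaks a
  rw [alt_fold_eq_peaks]
  ring

-- A's loop invariant: if A's run counter k is nonzero, the previous index was a peak,
-- in particular a[i-1] > a[i]; then at a peak i, k must be 0, so A adds exactly 1.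
lemma kpicco_loop_eq (a : List Int) (m : Nat) :
    ∀ (i k acc : Int),
      (k ≠ 0 → PySem.List.pyGetD a (i - 1) 0 > PySem.List.pyGetD a i 0) →
      ((PySem.List.pyRange i (i + m) 1).foldl
        (fun (s : Int × Int) j =>
          if PySem.List.pyGetD a j 0 > PySem.List.pyGetD a (j + 1) 0 ∧
             PySem.List.pyGetD a j 0 > PySem.List.pyGetD a (j - 1) 0 then
            (s.1 + 1, s.2 + (s.1 + 1))
          else
            (0, s.2))
        (k, acc)).2
      = (PySem.List.pyRange i (i + m) 1).foldl
          (fun (acc : Int) j =>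
            if PySem.List.pyGetD a j 0 > PySem.List.pyGetD a (j - 1) 0 ∧
               PySem.List.pyGetD a j 0 > PySem.List.pyGetD a (j + 1) 0 then
              acc + 1
            else
              acc)
          acc := by
  induction m with
  | zero =>
    intro i k acc _
    simp
  | succ m ih =>
    intro i k acc hk
    have hlt : i < i + ((m + 1 : Nat) : Int) := by push_cast; omega
    rw [PySem.List.pyRange_one_cons hlt]
    have hend : i + ((m + 1 : Nat) : Int) = (i + 1) + (m : Int) := by push_cast; ring
    by_cases hp : PySem.List.pyGetD a i 0 > PySem.List.pyGetD a (i + 1) 0 ∧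
        PySem.List.pyGetD a i 0 > PySem.List.pyGetD a (i - 1) 0
    · have hk0 : k = 0 := by
        by_contra h
        have := hk h
        omega
      simp only [List.foldl_cons, if_pos hp, if_pos (And.intro hp.2 hp.1), hk0, hend]
      have step := ih (i + 1) 1 (acc + 1)
        (fun _ => by simpa using hp.1)
      simpa using step
    · have hp' : ¬ (PySem.List.pyGetD a i 0 > PySem.List.pyGetD a (i - 1) 0 ∧
          PySem.List.pyGetD a i 0 > PySem.List.pyGetD a (i + 1) 0) := by
        intro h; exact hp ⟨h.2, h.1⟩
      simp only [List.foldl_cons, if_neg hp, if_neg hp', hend]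
      exact ih (i + 1) 0 acc (by simp)

-- Shifting an index fold one position down when the list loses its head (indices stay ≥ 1).
lemma shift_fold (x : Int) (rest : List Int) : ∀ (m : Nat) (lo acc : Int), 2 ≤ lo →
    (PySem.List.pyRange lo (lo + m) 1).foldl
      (fun (acc : Int) j =>
        if PySem.List.pyGetD (x :: rest) j 0 > PySem.List.pyGetD (x :: rest) (j - 1) 0 ∧
           PySem.List.pyGetD (x :: rest) j 0 > PySem.List.pyGetD (x :: rest) (j + 1) 0 then
          acc + 1 else acc) acc
    = (PySem.List.pyRange (lo - 1) (lo - 1 + m) 1).foldl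
      (fun (acc : Int) j =>
        if PySem.List.pyGetD rest j 0 > PySem.List.pyGetD rest (j - 1) 0 ∧
           PySem.List.pyGetD rest j 0 > PySem.List.pyGetD rest (j + 1) 0 then
          acc + 1 else acc) acc := by
  intro m
  induction m with
  | zero =>
    intro lo acc _
    simp [PySem.List.pyRange_one_eq_nil]
  | succ m ih =>
    intro lo acc hlo
    have h1 : lo < lo + ((m + 1 : Nat) : Int) := by push_cast; omega
    have h2 : lo - 1 < lo - 1 + ((m + 1 : Nat) : Int) := by push_cast; omega
    rw [PySem.List.pyRange_one_cons h1, PySem.List.pyRange_one_cons h2,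
        List.foldl_cons, List.foldl_cons]
    have hshift : ∀ (i : Int), 0 ≤ i →
        PySem.List.pyGetD (x :: rest) (i + 1) 0 = PySem.List.pyGetD rest i 0 := by
      intro i hi
      rw [PySem.List.pyGetD_of_nonneg, PySem.List.pyGetD_of_nonneg]
      · have h : (i + 1).toNat = i.toNat + 1 := by omega
        rw [h]; rfl
      · exact hi
      · omega
    have e1 : PySem.List.pyGetD (x :: rest) lo 0 = PySem.List.pyGetD rest (lo - 1) 0 := by
      have := hshift (lo - 1) (by omega); simpa using this
    have e2 : PySem.List.pyGetD (x :: rest) (lo - 1) 0 = PySem.List.pyGetD rest (lo - 1 - 1) 0 := by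
      have := hshift (lo - 2) (by omega)
      have h3 : lo - 2 + 1 = lo - 1 := by omega
      rw [h3] at this
      rw [this]; congr 1; omega
    have e3 : PySem.List.pyGetD (x :: rest) (lo + 1) 0 = PySem.List.pyGetD rest (lo - 1 + 1) 0 := by
      have := hshift lo (by omega)
      rw [this]; congr 1; omega
    rw [e1, e2, e3]
    have hend : lo + ((m + 1 : Nat) : Int) = (lo + 1) + (m : Int) := by push_cast; ring
    have hend2 : lo - 1 + ((m + 1 : Nat) : Int) = (lo + 1) - 1 + (m : Int) := by push_cast; ring
    rw [hend, hend2, show lo - 1 + 1 = (lo + 1) - 1 from by ring]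
    exact ih (lo + 1) _ (by omega)

-- A's index-based count over range(1, n-1) equals the structural peak count.
lemma idx_eq_peaks : ∀ (a : List Int) (acc : Int),
    (PySem.List.pyRange 1 ((a.length : Int) - 1) 1).foldl
      (fun (acc : Int) j =>
        if PySem.List.pyGetD a j 0 > PySem.List.pyGetD a (j - 1) 0 ∧
           PySem.List.pyGetD a j 0 > PySem.List.pyGetD a (j + 1) 0 then
          acc + 1 else acc) acc
    = acc + pvPeaks a := by
  intro a
  induction a with
  | nil => intro acc; simp [pvPeaks, PySem.List.pyRange_one_eq_nil]
  | cons x rest ih =>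
    intro acc
    match rest with
    | [] => simp [pvPeaks, PySem.List.pyRange_one_eq_nil]
    | [y] => simp [pvPeaks, PySem.List.pyRange_one_eq_nil]
    | y :: z :: t =>
      have hlen : ((x :: y :: z :: t).length : Int) - 1 = 2 + (t.length : Int) := by
        simp; omega
      rw [hlen]
      have hcons : PySem.List.pyRange 1 (2 + (t.length : Int)) 1
          = 1 :: PySem.List.pyRange 2 (2 + (t.length : Int)) 1 := by
        rw [PySem.List.pyRange_one_cons (by omega)]; norm_num
      rw [hcons, List.foldl_cons]
      have g0 : PySem.List.pyGetD (x :: y :: z :: t) ((1:Int) - 1) 0 = x := by norm_num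
      have g1 : PySem.List.pyGetD (x :: y :: z :: t) (1:Int) 0 = y := by simp [pysem]
      have g2 : PySem.List.pyGetD (x :: y :: z :: t) ((1:Int) + 1) 0 = z := by norm_num; simp [pysem]
      rw [g0, g1, g2]
      have hsf := shift_fold x (y :: z :: t) t.length 2
        (if y > x ∧ y > z then acc + 1 else acc) (by omega)
      rw [hsf]
      have hlen2 : (2 : Int) - 1 + (t.length : Int) = (( (y :: z :: t).length : Int) - 1) := by
        simp; omega
      rw [show (2:Int) - 1 = 1 from by norm_num] at hlen2 ⊢
      rw [hlen2, ih]
      show _ = acc + pvPeaks (x :: y :: z :: t)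
      rw [show pvPeaks (x :: y :: z :: t)
            = (if y > x ∧ y > z then (1:Int) else 0) + pvPeaks (y :: z :: t) from rfl]
      by_cases hc : y > x ∧ y > z
      · rw [if_pos hc, if_pos hc]; ring
      · rw [if_neg hc, if_neg hc]; ring

-- A's side, assembled: A's full loop also returns the structural peak count.
lemma a_eq_peaks (a : List Int) : kpicco a = pvPeaks a := by
  unfold kpicco
  set n : Int := (a.length : Int) with hn
  by_cases hsmall : n = 1 ∨ n = 2
  · rw [if_pos hsmall]
    match a with
    | [] => exfalso; simp at hn; rcases hsmall <;> omega
    | [x] => rfl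
    | [x, y] => rfl
    | x :: y :: z :: t => exfalso; simp at hn; rcases hsmall <;> omega
  · simp only [if_neg hsmall]
    by_cases hbig : 3 ≤ n
    · have hm : (1 : Int) + ((n - 2).toNat : Int) = n - 1 := by omega
      have h1 := kpicco_loop_eq a (n - 2).toNat 1 0 0 (by simp)
      rw [hm] at h1
      rw [h1, idx_eq_peaks]
      ring
    · have hle : n - 1 ≤ 1 := by omega
      rw [PySem.List.pyRange_one_eq_nil hle]
      have hlen0 : a = [] := by
        match a with
        | [] => rfl
        | x :: rest =>
          exfalso
          simp at hn
          omega
      subst hlen0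
      simp [pvPeaks]

-- ===== VERDICT (by name: the statement is the Claim_ definition above) =====
theorem kpicco_spec : Claim_equal_kpicco := by
  intro a _
  unfold Spec_kpicco
  rw [a_eq_peaks, alt_eq_peaks]
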